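-- pv_equiv track=rewrite | github.com/PyEED/pyeed | pyeed/core/alignment.py | _get_numbering_string
-- ===== SOURCE A (Python) =====
-- from typing import List, Optional, Union, Tuple, TYPE_CHECKING
--
-- def _get_numbering_string(reference: str, query: str) -> List[str]:
--     """
--     Assigns pairwise numbering to the reference and query sequences.
--
--     Args:
--         reference (str): The reference sequence.
--         query (str): The query sequence.
--
--     Returns:
--         List[str]: A list of pairwise numbering.
--     """
--
--     numbering = []
--     reference_counter = 0
--     query_counter = 1
--
--     for ref_pos, que_pos in zip(reference, query):
--         if ref_pos == "-":
--             numbering.append(f"{reference_counter}.{query_counter}")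
--             query_counter += 1
--         else:
--             reference_counter += 1
--             if que_pos != "-":
--                 numbering.append(f"{reference_counter}.{query_counter}")
--                 query_counter += 1
--             else:
--                 numbering.append(str(reference_counter))
--
--     return numbering
-- ===== SOURCE B (Python) =====
-- def _get_numbering_string(reference: str, query: str):
--     """Prefix-count tables + a separate formatting pass (no threaded counters)."""
--     pairs = list(zip(reference, query))
--     # reference index at each aligned position: non-gap reference chars so far
--     ref_idx = []
--     r = 0
--     for rp, _ in pairs:
--         r += rp != "-"
--         ref_idx.append(r)
--     # query index at each position: starts at 1, advances except on ref-char/query-gap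
--     q_idx = []
--     q = 1
--     for rp, qp in pairs:
--         q_idx.append(q)
--         q += not (rp != "-" and qp == "-")
--     return [
--         str(ri) if rp != "-" and qp == "-" else f"{ri}.{qi}"
--         for (rp, qp), ri, qi in zip(pairs, ref_idx, q_idx)
--     ]
-- ===== Notes on version B (the rewrite author's own statement) =====
-- stated objective: alternative
-- what changed: Replaces the single loop threading two mutable counters with two prefix-count tables built first and a separate formatting comprehension zipping the pairs with both tables.
import Mathlib
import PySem

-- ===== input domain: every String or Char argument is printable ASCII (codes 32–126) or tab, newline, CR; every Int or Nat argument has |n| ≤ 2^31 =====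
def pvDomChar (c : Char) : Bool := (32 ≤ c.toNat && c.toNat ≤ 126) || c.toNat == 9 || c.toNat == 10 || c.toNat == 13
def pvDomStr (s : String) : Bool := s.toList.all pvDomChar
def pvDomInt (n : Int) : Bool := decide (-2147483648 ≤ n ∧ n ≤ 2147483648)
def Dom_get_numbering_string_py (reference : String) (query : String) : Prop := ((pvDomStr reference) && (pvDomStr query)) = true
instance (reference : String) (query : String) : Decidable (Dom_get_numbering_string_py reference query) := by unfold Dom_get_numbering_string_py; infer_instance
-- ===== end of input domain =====

-- B replaces the counter-threading loop by prefix-count tables plus a separate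
-- formatting pass; equivalence of return values is proved on all inputs (no Pre_).


-- ===== PORT A =====
-- literal port of A: one fold over zip(reference, query) threading
-- (numbering, reference_counter, query_counter); the loop body is pvStepA
def pvStepA (st : List String × Int × Int) (p : Char × Char) : List String × Int × Int :=
  if p.1 = '-' then
    (st.1 ++ [PySem.Int.toStr st.2.1 ++ "." ++ PySem.Int.toStr st.2.2], st.2.1, st.2.2 + 1)
  else
    if p.2 ≠ '-' then
      (st.1 ++ [PySem.Int.toStr (st.2.1 + 1) ++ "." ++ PySem.Int.toStr st.2.2], st.2.1 + 1, st.2.2 + 1)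
    else
      (st.1 ++ [PySem.Int.toStr (st.2.1 + 1)], st.2.1 + 1, st.2.2)

def get_numbering_string_py (reference : String) (query : String) : List String :=
  ((List.zip reference.toList query.toList).foldl pvStepA ([], 0, 1)).1

-- ===== PORT B =====
-- literal port of B: build the two prefix-count tables (loop bodies pvStepR and
-- pvStepQ), then format by zipping the pairs with both tables
def pvStepR (st : List Int × Int) (p : Char × Char) : List Int × Int :=
  let r := st.2 + (if p.1 ≠ '-' then (1 : Int) else 0)
  (st.1 ++ [r], r)

def pvStepQ (st : List Int × Int) (p : Char × Char) : List Int × Int :=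
  (st.1 ++ [st.2], st.2 + (if ¬ (p.1 ≠ '-' ∧ p.2 = '-') then (1 : Int) else 0))

def pvFmt (t : (Char × Char) × Int × Int) : String :=
  if t.1.1 ≠ '-' ∧ t.1.2 = '-' then PySem.Int.toStr t.2.1
  else PySem.Int.toStr t.2.1 ++ "." ++ PySem.Int.toStr t.2.2

def get_numbering_string_py_alt (reference : String) (query : String) : List String :=
  let pairs := List.zip reference.toList query.toList
  let refIdx := (pairs.foldl pvStepR ([], 0)).1
  let qIdx := (pairs.foldl pvStepQ ([], 1)).1
  (pairs.zip (refIdx.zip qIdx)).map pvFmt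

-- ===== PRECONDITION & SPEC =====
def Spec_get_numbering_string_py (reference : String) (query : String) (out : List String) : Prop := out = get_numbering_string_py_alt reference query
instance (reference : String) (query : String) (out : List String) : Decidable (Spec_get_numbering_string_py reference query out) := by unfold Spec_get_numbering_string_py; infer_instance

-- ===== CLAIM (what is proved, stated in full; the proofs are below) =====
def Claim_equal_get_numbering_string_py : Prop := ∀ (reference : String) (query : String), Dom_get_numbering_string_py reference query → Spec_get_numbering_string_py reference query (get_numbering_string_py reference query)

-- ===== LEMMAS AND PROOFS =====

-- reference-value emitted at each position (recursive form of both programs)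
def pvGo (ps : List (Char × Char)) (rc qc : Int) : List String :=
  match ps with
  | [] => []
  | p :: t =>
    if p.1 = '-' then
      (PySem.Int.toStr rc ++ "." ++ PySem.Int.toStr qc) :: pvGo t rc (qc + 1)
    else if p.2 ≠ '-' then
      (PySem.Int.toStr (rc + 1) ++ "." ++ PySem.Int.toStr qc) :: pvGo t (rc + 1) (qc + 1)
    else
      PySem.Int.toStr (rc + 1) :: pvGo t (rc + 1) qc

def pvRefList (ps : List (Char × Char)) (rc : Int) : List Int :=
  match ps with
  | [] => []
  | p :: t =>
    let r := rc + (if p.1 ≠ '-' then (1 : Int) else 0)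
    r :: pvRefList t r

def pvQList (ps : List (Char × Char)) (qc : Int) : List Int :=
  match ps with
  | [] => []
  | p :: t => qc :: pvQList t (qc + (if ¬ (p.1 ≠ '-' ∧ p.2 = '-') then (1 : Int) else 0))

theorem pvA_fold (ps : List (Char × Char)) :
    ∀ (acc : List String) (rc qc : Int),
    (ps.foldl pvStepA (acc, rc, qc)).1 = acc ++ pvGo ps rc qc := by
  induction ps with
  | nil => intro acc rc qc; simp [pvGo]
  | cons p t ih =>
    intro acc rc qc
    rw [List.foldl_cons]
    by_cases h1 : p.1 = '-'
    · simp only [pvStepA, h1, if_true]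
      rw [ih]; simp [pvGo, h1]
    · by_cases h2 : p.2 = '-'
      · simp only [pvStepA, if_neg h1, h2, ne_eq, not_true_eq_false, if_false]
        rw [ih]; simp [pvGo, h1, h2]
      · simp only [pvStepA, if_neg h1, ne_eq, h2, not_false_eq_true, if_true]
        rw [ih]; simp [pvGo, h1, h2]

theorem pvB_fold_ref (ps : List (Char × Char)) :
    ∀ (acc : List Int) (rc : Int),
    (ps.foldl pvStepR (acc, rc)).1 = acc ++ pvRefList ps rc := by
  induction ps with
  | nil => intro acc rc; simp [pvRefList]
  | cons p t ih =>
    intro acc rc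
    rw [List.foldl_cons]
    show (t.foldl pvStepR (acc ++ [rc + (if p.1 ≠ '-' then (1 : Int) else 0)],
      rc + (if p.1 ≠ '-' then (1 : Int) else 0))).1 = _
    rw [ih]; simp [pvRefList]

theorem pvB_fold_q (ps : List (Char × Char)) :
    ∀ (acc : List Int) (qc : Int),
    (ps.foldl pvStepQ (acc, qc)).1 = acc ++ pvQList ps qc := by
  induction ps with
  | nil => intro acc qc; simp [pvQList]
  | cons p t ih =>
    intro acc qc
    rw [List.foldl_cons]
    show (t.foldl pvStepQ (acc ++ [qc],
      qc + (if ¬ (p.1 ≠ '-' ∧ p.2 = '-') then (1 : Int) else 0))).1 = _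
    rw [ih]; simp [pvQList]

theorem pvB_map_go (ps : List (Char × Char)) :
    ∀ (rc qc : Int),
    (ps.zip ((pvRefList ps rc).zip (pvQList ps qc))).map pvFmt = pvGo ps rc qc := by
  induction ps with
  | nil => intro rc qc; simp [pvGo]
  | cons p t ih =>
    intro rc qc
    by_cases h1 : p.1 = '-'
    · simp [pvRefList, pvQList, pvGo, pvFmt, h1, ih]
    · by_cases h2 : p.2 = '-'
      · simp [pvRefList, pvQList, pvGo, pvFmt, h1, h2, ih]
      · simp [pvRefList, pvQList, pvGo, pvFmt, h1, h2, ih]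

-- ===== VERDICT (by name: the statement is the Claim_ definition above) =====
theorem get_numbering_string_py_spec : Claim_equal_get_numbering_string_py := by
  intro reference query _
  show get_numbering_string_py reference query = get_numbering_string_py_alt reference query
  simp only [get_numbering_string_py, get_numbering_string_py_alt]
  rw [pvA_fold, pvB_fold_ref, pvB_fold_q]
  simp [pvB_map_go]
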